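-- pv_equiv track=rewrite | github.com/peterbikes/100_Python_Projects | 100 Python Projects/Jacobsthal Numbers/jacobsthal_numbers.py | is_it_jacob
-- ===== SOURCE A (Python) =====
-- def is_it_jacob(number):
--     if(number == 0 or number == 1):
--         return True
--     prev = 1
--     i = 3
--     swap = 0
--     while i <= number:
--         if(number == i):
--             return True
--         swap = i
--         i = i + (2*prev)
--         prev = swap
--     return False
-- ===== SOURCE B (Python) =====
-- def is_it_jacob(number):
--     # closed form: n is Jacobsthal iff 3n+1 or 3n-1 is a power of two
--     def is_pow2(x):
--         if x <= 0:
--             return False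
--         while x % 2 == 0:
--             x //= 2
--         return x == 1
--     return is_pow2(3 * number + 1) or is_pow2(3 * number - 1)
-- ===== Notes on version B (the rewrite author's own statement) =====
-- stated objective: simpler
-- what changed: Replaces the Jacobsthal generation loop (i = i + 2*prev recurrence) with a closed-form membership test: n is Jacobsthal iff 3n+1 or 3n-1 is a power of two, checked by stripping factors of 2.
import Mathlib
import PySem

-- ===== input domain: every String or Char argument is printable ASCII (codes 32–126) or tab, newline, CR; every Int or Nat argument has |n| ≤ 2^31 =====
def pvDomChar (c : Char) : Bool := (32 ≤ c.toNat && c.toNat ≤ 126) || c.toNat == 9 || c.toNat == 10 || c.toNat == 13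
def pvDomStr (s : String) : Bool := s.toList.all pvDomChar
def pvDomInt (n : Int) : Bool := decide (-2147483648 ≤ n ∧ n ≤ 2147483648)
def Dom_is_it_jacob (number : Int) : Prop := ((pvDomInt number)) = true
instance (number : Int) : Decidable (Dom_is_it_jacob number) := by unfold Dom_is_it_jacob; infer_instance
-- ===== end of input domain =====

-- B replaces A's Jacobsthal generation loop by the closed-form test "3n+1 or 3n-1 is a power of two" (objective: simpler).

-- ===== PORT A =====
-- the while loop of A; fuel is only a totality guard (i strictly grows each step on every reachable state)
def jacLoop (number prev i : Int) (fuel : Nat) : Bool :=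
  match fuel with
  | 0 => false
  | f + 1 =>
    if i ≤ number then
      if number == i then true
      else jacLoop number i (i + 2 * prev) f
    else false

def is_it_jacob (number : Int) : Bool :=
  if number == 0 || number == 1 then true
  else jacLoop number 1 3 (number.toNat + 1)

-- ===== PORT B =====
-- the 'while x % 2 == 0: x //= 2' loop of B; fuel is only a totality guard (caller passes x ≥ 1, which halves each step)
def oddPart (fuel : Nat) (x : Int) : Int :=
  match fuel with
  | 0 => x
  | f + 1 => if PySem.Int.mod x 2 == 0 then oddPart f (PySem.Int.floordiv x 2) else x

def isPow2 (x : Int) : Bool :=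
  if x ≤ 0 then false else oddPart x.toNat x == 1

def is_it_jacob_alt (number : Int) : Bool :=
  isPow2 (3 * number + 1) || isPow2 (3 * number - 1)

-- ===== PRECONDITION & SPEC =====
def Spec_is_it_jacob (number : Int) (out : Bool) : Prop := out = is_it_jacob_alt number
instance (number : Int) (out : Bool) : Decidable (Spec_is_it_jacob number out) := by unfold Spec_is_it_jacob; infer_instance

-- ===== CLAIM (what is proved, stated in full; the proofs are below) =====
def Claim_equal_is_it_jacob : Prop := ∀ (number : Int), Dom_is_it_jacob number → Spec_is_it_jacob number (is_it_jacob number)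

-- ===== LEMMAS AND PROOFS =====

-- the common characterization: n is accepted iff 3n = 2^m ± 1 for some m
def JacForm (n : Int) : Prop := ∃ m : Nat, 3 * n = 2 ^ m + 1 ∨ 3 * n = 2 ^ m - 1

-- B side: oddPart keeps "being a power of two" as its invariant
lemma oddPart_iff : ∀ (fuel : Nat) (x : Int), 1 ≤ x → x ≤ (fuel : Int) →
    (oddPart fuel x = 1 ↔ ∃ k : Nat, x = 2 ^ k) := by
  intro fuel
  induction fuel with
  | zero => intro x hx hle; simp at hle; omega
  | succ f ih =>
    intro x hx hle
    rw [oddPart]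
    by_cases h2 : PySem.Int.mod x 2 = 0
    · have hdvd : (2 : Int) ∣ x := (PySem.Int.mod_eq_zero_iff_dvd x 2).1 h2
      obtain ⟨y, hy⟩ := hdvd
      have hfd : PySem.Int.floordiv x 2 = x / 2 :=
        PySem.Int.floordiv_eq_ediv_of_pos (by omega)
      have hy2 : x / 2 = y := by omega
      have hy1 : 1 ≤ y := by omega
      have hyf : y ≤ (f : Int) := by push_cast at hle ⊢; omega
      simp only [h2, beq_self_eq_true, if_true, hfd, hy2]
      rw [ih y hy1 hyf]
      constructor
      · rintro ⟨k, rfl⟩; exact ⟨k + 1, by rw [hy]; ring⟩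
      · rintro ⟨k, hk⟩
        match k with
        | 0 => omega
        | k + 1 => exact ⟨k, by rw [pow_succ] at hk; omega⟩
    · simp only [beq_iff_eq, h2, if_false]
      constructor
      · rintro rfl; exact ⟨0, by norm_num⟩
      · rintro ⟨k, rfl⟩
        match k with
        | 0 => norm_num
        | k + 1 =>
          exfalso; apply h2
          rw [PySem.Int.mod_eq_zero_iff_dvd]
          exact ⟨2 ^ k, by ring⟩

lemma isPow2_iff (x : Int) : isPow2 x = true ↔ ∃ k : Nat, x = 2 ^ k := by
  unfold isPow2
  by_cases hx : x ≤ 0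
  · simp only [hx, if_true, Bool.false_eq_true, false_iff]
    rintro ⟨k, rfl⟩
    exact absurd hx (not_le.2 (by positivity))
  · have hx1 : 1 ≤ x := by omega
    simp only [hx, if_false, beq_iff_eq]
    exact oddPart_iff x.toNat x hx1 (by omega)

lemma alt_iff (n : Int) : is_it_jacob_alt n = true ↔ JacForm n := by
  unfold is_it_jacob_alt JacForm
  rw [Bool.or_eq_true, isPow2_iff, isPow2_iff]
  constructor
  · rintro (⟨k, hk⟩ | ⟨k, hk⟩)
    · exact ⟨k, Or.inr (by omega)⟩
    · exact ⟨k, Or.inl (by omega)⟩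
  · rintro ⟨m, h | h⟩
    · exact Or.inr ⟨m, by omega⟩
    · exact Or.inl ⟨m, by omega⟩

-- A side: the loop state is always (prev, i) with 3i = 2^k + e, 3 prev = 2^(k-1) - e, e = ±1
lemma jacLoop_iff : ∀ (fuel : Nat) (n prev i : Int) (k : Nat) (e : Int),
    3 ≤ k → (e = 1 ∨ e = -1) → 3 * i = 2 ^ k + e → 3 * prev = 2 ^ (k - 1) - e →
    n - i + 1 ≤ (fuel : Int) →
    (jacLoop n prev i fuel = true ↔ ∃ m : Nat, k ≤ m ∧ (3 * n = 2 ^ m + 1 ∨ 3 * n = 2 ^ m - 1)) := by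
  intro fuel
  induction fuel with
  | zero =>
    intro n prev i k e hk he hi hprev hfuel
    simp only [jacLoop, Bool.false_eq_true, false_iff]
    rintro ⟨m, hm, hcase⟩
    have hpow : (2 : Int) ^ k ≤ 2 ^ m := pow_le_pow_right₀ (by norm_num) hm
    -- n < i, so 3n < 2^k - 1 ≤ 2^m ± 1
    simp at hfuel; omega
  | succ f ih =>
    intro n prev i k e hk he hi hprev hfuel
    rw [jacLoop]
    by_cases hin : i ≤ n
    · simp only [hin, if_true, beq_iff_eq]
      by_cases hni : n = i
      · simp only [hni, if_true, true_iff]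
        exact ⟨k, le_refl k, by omega⟩
      · simp only [hni, if_false]
        have hk1 : k - 1 + 1 = k := by omega
        have hstep : 3 * (i + 2 * prev) = 2 ^ (k + 1) + (-e) := by
          have : (2 : Int) ^ k = 2 ^ (k - 1) * 2 := by
            rw [← pow_succ, hk1]
          rw [mul_add]; omega
        have hprev' : 3 * i = 2 ^ (k + 1 - 1) - (-e) := by simp; omega
        have hpk : (8 : Int) ≤ 2 ^ k := by
          calc (8 : Int) = 2 ^ 3 := by norm_num
          _ ≤ 2 ^ k := pow_le_pow_right₀ (by norm_num) hk
        have hpk1 : (4 : Int) ≤ 2 ^ (k - 1) := by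
          calc (4 : Int) = 2 ^ 2 := by norm_num
          _ ≤ 2 ^ (k - 1) := pow_le_pow_right₀ (by norm_num) (by omega)
        have hfuel' : n - (i + 2 * prev) + 1 ≤ (f : Int) := by push_cast at hfuel ⊢; omega
        rw [ih n i (i + 2 * prev) (k + 1) (-e) (by omega) (by omega) hstep hprev' hfuel']
        constructor
        · rintro ⟨m, hm, hc⟩; exact ⟨m, by omega, hc⟩
        · rintro ⟨m, hm, hc⟩
          refine ⟨m, ?_, hc⟩
          rcases Nat.lt_or_ge k m with h | h
          · omega
          · exfalso
            have hmk : m = k := by omega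
            subst hmk
            -- 3n = 2^m ± 1 and 3i = 2^m + e with n ≠ i: impossible
            omega
    · simp only [hin, if_false, Bool.false_eq_true, false_iff]
      rintro ⟨m, hm, hcase⟩
      have hpow : (2 : Int) ^ k ≤ 2 ^ m := pow_le_pow_right₀ (by norm_num) hm
      omega

lemma a_iff (n : Int) : is_it_jacob n = true ↔ JacForm n := by
  unfold is_it_jacob
  by_cases h01 : n = 0 ∨ n = 1
  · have : (n == 0 || n == 1) = true := by
      rcases h01 with rfl | rfl <;> decide
    simp only [this, if_true, true_iff]
    rcases h01 with rfl | rfl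
    · exact ⟨0, by norm_num⟩
    · exact ⟨2, by norm_num⟩
  · have hne : (n == 0 || n == 1) = false := by
      simp only [Bool.or_eq_false_iff, beq_eq_false_iff_ne, ne_eq]
      exact ⟨fun h => h01 (Or.inl h), fun h => h01 (Or.inr h)⟩
    simp only [hne, Bool.false_eq_true, if_false]
    have hfuel : n - 3 + 1 ≤ ((n.toNat + 1 : Nat) : Int) := by push_cast; omega
    rw [jacLoop_iff (n.toNat + 1) n 1 3 3 1 (le_refl 3) (Or.inl rfl) (by norm_num) (by norm_num) hfuel]
    unfold JacForm
    constructor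
    · rintro ⟨m, _, hc⟩; exact ⟨m, by omega⟩
    · rintro ⟨m, hc⟩
      refine ⟨m, ?_, by omega⟩
      by_contra hlt
      have hm2 : m ≤ 2 := by omega
      have : (2 : Int) ^ m ≤ 4 := by
        calc (2 : Int) ^ m ≤ 2 ^ 2 := pow_le_pow_right₀ (by norm_num) hm2
        _ = 4 := by norm_num
      -- then 3n ≤ 5, so n ∈ {0,1} or no solution, contradicting h01 / hc
      have hpos : (0 : Int) < 2 ^ m := by positivity
      omega

-- ===== VERDICT (by name: the statement is the Claim_ definition above) =====
theorem is_it_jacob_spec : Claim_equal_is_it_jacob := by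
  intro n _
  unfold Spec_is_it_jacob
  have hA := a_iff n
  have hB := alt_iff n
  cases hA' : is_it_jacob n <;> cases hB' : is_it_jacob_alt n <;> simp_all
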